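-- pv_equiv track=rewrite | github.com/naveen-joshi/cortexcode | cortexcode/diagrams/file_tree.py | generate_file_tree_diagram
-- ===== SOURCE A (Python) =====
-- from typing import Any
--
-- def generate_file_tree_diagram(index_data: dict[str, Any], max_depth: int = 3) -> str:
--     files = index_data.get("files", {})
--
--     lines = ["graph TD"]
--     lines.append("    %% File Tree Structure")
--
--     tree: dict[str, Any] = {}
--     for path in sorted(files.keys())[:50]:
--         parts = path.split("/")
--         current = tree
--         for part in parts:
--             if part not in current:
--                 current[part] = {}
--             current = current[part]
--
--     def render_tree(node: dict[str, Any], prefix: str = "", depth: int = 0) -> list[str]: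
--         result = []
--         items = sorted(node.items())
--         for i, (name, children) in enumerate(items):
--             is_last = i == len(items) - 1
--             connector = "└── " if is_last else "├── "
--             result.append(f"    {prefix}{connector}{name}")
--             if children and depth < max_depth:
--                 new_prefix = prefix + ("    " if is_last else "│   ")
--                 result.extend(render_tree(children, new_prefix, depth + 1))
--         return result
--
--     lines.extend(render_tree(tree))
--
--     return "\n".join(lines)
-- ===== SOURCE B (Python) =====
-- def generate_file_tree_diagram(index_data, max_depth=3):
--     files = index_data.get("files", {})
--
--     lines = ["graph TD"]
--     lines.append("    %% File Tree Structure")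
--
--     tree = {}
--     for path in sorted(files.keys())[:50]:
--         parts = path.split("/")
--         current = tree
--         for part in parts:
--             if part not in current:
--                 current[part] = {}
--             current = current[part]
--
--     def annotate(node, prefix, depth):
--         items = sorted(node.items())
--         n = len(items)
--         return [(name, children, prefix, depth, i == n - 1)
--                 for i, (name, children) in enumerate(items)]
--
--     # iterative DFS with an explicit stack instead of recursion
--     stack = list(reversed(annotate(tree, "", 0)))
--     while stack:
--         name, children, prefix, depth, is_last = stack.pop()
--         connector = "└── " if is_last else "├── "
--         lines.append(f"    {prefix}{connector}{name}")
--         if children and depth < max_depth: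
--             new_prefix = prefix + ("    " if is_last else "│   ")
--             stack.extend(reversed(annotate(children, new_prefix, depth + 1)))
--
--     return "\n".join(lines)
-- ===== Notes on version B (the rewrite author's own statement) =====
-- stated objective: alternative
-- what changed: The recursive render_tree is replaced by an iterative depth-first traversal over an explicit stack of (name, children, prefix, depth, is_last) entries (children pushed in reverse so pop order preserves the preorder); the trie-building loop and output format are unchanged.
import Mathlib
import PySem

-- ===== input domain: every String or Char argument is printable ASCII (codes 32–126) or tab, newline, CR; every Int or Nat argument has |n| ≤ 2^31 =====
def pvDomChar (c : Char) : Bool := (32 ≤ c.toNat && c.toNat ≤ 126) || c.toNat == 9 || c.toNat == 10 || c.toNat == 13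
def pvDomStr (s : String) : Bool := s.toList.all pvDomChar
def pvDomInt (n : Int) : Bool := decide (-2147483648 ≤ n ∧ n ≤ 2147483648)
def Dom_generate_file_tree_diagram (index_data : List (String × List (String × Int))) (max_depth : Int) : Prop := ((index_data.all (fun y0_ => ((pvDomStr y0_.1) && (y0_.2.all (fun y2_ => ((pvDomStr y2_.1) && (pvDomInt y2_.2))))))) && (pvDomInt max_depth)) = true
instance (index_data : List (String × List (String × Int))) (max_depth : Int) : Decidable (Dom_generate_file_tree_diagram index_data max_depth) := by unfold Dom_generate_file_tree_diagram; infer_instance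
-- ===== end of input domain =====

-- B replaces A's recursive render_tree by an explicit-stack iterative DFS (same trie-building loop);
-- objective: alternative decomposition, same output.

-- ===== PORT A =====
-- Python's nested dict[str, Any] trie, encoded without a nested inductive:
-- `cons name children rest` is the association list entry (name ↦ children) followed by `rest`.
inductive TrieL where
  | nil : TrieL
  | cons : String → TrieL → TrieL → TrieL
deriving DecidableEq, Repr

-- size measure used only for termination
def TrieL.sz : TrieL → Nat
  | .nil => 0
  | .cons _ c rest => 1 + c.sz + rest.sz

-- the inner `for part in parts` loop: walk/extend the trie along the path
-- (functional rendering of Python's in-place `current[part] = {}` / `current = current[part]`)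
def trieInsertPath : List String → TrieL → TrieL
  | [], t => t
  | p :: ps, .nil => .cons p (trieInsertPath ps .nil) .nil
  | p :: ps, .cons q c r =>
      if q = p then .cons q (trieInsertPath ps c) r
      else .cons q c (trieInsertPath (p :: ps) r)
termination_by l t => (l.length, sizeOf t)

-- node.items() in insertion order
def TrieL.toPairs : TrieL → List (String × TrieL)
  | .nil => []
  | .cons q c r => (q, c) :: r.toPairs

-- size of an items list (termination measure)
def pairsSz : List (String × TrieL) → Nat
  | [] => 0
  | (_, c) :: tl => 1 + c.sz + pairsSz tl

theorem pairsSz_perm {l l' : List (String × TrieL)} (h : l.Perm l') : pairsSz l = pairsSz l' := by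
  induction h with
  | nil => rfl
  | cons x _ ih => cases x; simp [pairsSz, ih]
  | swap x y l => cases x; cases y; simp [pairsSz]; omega
  | trans _ _ ih1 ih2 => omega

theorem pairsSz_toPairs (t : TrieL) : pairsSz t.toPairs = t.sz := by
  induction t with
  | nil => rfl
  | cons q c r _ ihr => simp [TrieL.toPairs, pairsSz, TrieL.sz, ihr]

theorem pairsSz_sorted (l : List (String × TrieL)) :
    pairsSz (PySem.List.sorted l (fun p => p.1) false) = pairsSz l :=
  pairsSz_perm (PySem.List.sorted_perm l (fun p => p.1) false)

-- render_tree's loop over `sorted(node.items())` (names are distinct, so Python's tuple sort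
-- is a sort by name); `i == len(items) - 1` is ported as `tl.isEmpty` (the same value);
-- the recursive call re-enters on the sorted items of `children`, as render_tree does
def goA (maxd : Int) (pre : String) (depth : Int) : List (String × TrieL) → List String
  | [] => []
  | (name, children) :: tl =>
    let is_last := tl.isEmpty
    let connector := if is_last then "└── " else "├── "
    let line := "    " ++ pre ++ connector ++ name
    let sub :=
      if children ≠ TrieL.nil ∧ depth < maxd then
        goA maxd (pre ++ (if is_last then "    " else "│   ")) (depth + 1)
          (PySem.List.sorted children.toPairs (fun p => p.1) false)
      else []
    line :: (sub ++ goA maxd pre depth tl)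
termination_by l => pairsSz l
decreasing_by
  · rw [pairsSz_sorted, pairsSz_toPairs]; simp only [pairsSz]; omega
  · simp only [pairsSz]; omega

-- render_tree(node, prefix, depth)
def renderA (maxd : Int) (node : TrieL) (pre : String) (depth : Int) : List String :=
  goA maxd pre depth (PySem.List.sorted node.toPairs (fun p => p.1) false)

def generate_file_tree_diagram (index_data : List (String × List (String × Int))) (max_depth : Int) : String :=
  let files := (PySem.Dict.ofList index_data).getD "files" []
  let lines := ["graph TD", "    %% File Tree Structure"]
  let tree :=
    (PySem.List.slice
        (PySem.List.sorted (PySem.Dict.ofList files).keys (fun k => k) false)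
        none (some 50)).foldl
      -- sep "/" is nonempty, so split? is always `some`
      (fun t path => trieInsertPath ((PySem.Str.split? path "/").getD []) t) TrieL.nil
  PySem.Str.join "\n" (lines ++ renderA max_depth tree "" 0)

-- ===== PORT B =====
-- stack entries (name, children, prefix, depth, is_last); Python's end-of-list stack with
-- reverse-pushes is modelled as a front-of-list stack with in-order prepends (same pop order)
def goAnn (pre : String) (depth : Int) : List (String × TrieL) → List (String × TrieL × String × Int × Bool)
  | [] => []
  | (name, children) :: tl => (name, children, pre, depth, tl.isEmpty) :: goAnn pre depth tl

def annotateB (node : TrieL) (pre : String) (depth : Int) : List (String × TrieL × String × Int × Bool) :=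
  goAnn pre depth (PySem.List.sorted node.toPairs (fun p => p.1) false)

-- termination measure for the stack loop
def stackSz : List (String × TrieL × String × Int × Bool) → Nat
  | [] => 0
  | (_, c, _, _, _) :: tl => 1 + 2 * c.sz + stackSz tl

theorem stackSz_append (a b : List (String × TrieL × String × Int × Bool)) :
    stackSz (a ++ b) = stackSz a + stackSz b := by
  induction a with
  | nil => simp [stackSz]
  | cons hd tl ih => obtain ⟨_, c, _, _, _⟩ := hd; simp [stackSz, ih]; omega

theorem stackSz_goAnn_le (pre : String) (depth : Int) (l : List (String × TrieL)) :
    stackSz (goAnn pre depth l) ≤ 2 * pairsSz l := by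
  induction l generalizing pre depth with
  | nil => simp [goAnn, stackSz, pairsSz]
  | cons hd tl ih =>
    obtain ⟨n, c⟩ := hd
    simp only [goAnn, stackSz, pairsSz]
    have := ih pre depth
    omega

theorem stackSz_annotateB_le (node : TrieL) (pre : String) (depth : Int) :
    stackSz (annotateB node pre depth) ≤ 2 * node.sz := by
  have h := stackSz_goAnn_le pre depth (PySem.List.sorted node.toPairs (fun p => p.1) false)
  rw [pairsSz_sorted, pairsSz_toPairs] at h
  exact h

-- the while-loop over the explicit stack
def renderB (maxd : Int) : List (String × TrieL × String × Int × Bool) → List String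
  | [] => []
  | (name, children, pre, depth, is_last) :: rest =>
    let connector := if is_last then "└── " else "├── "
    let line := "    " ++ pre ++ connector ++ name
    if children ≠ TrieL.nil ∧ depth < maxd then
      line :: renderB maxd
        (annotateB children (pre ++ (if is_last then "    " else "│   ")) (depth + 1) ++ rest)
    else
      line :: renderB maxd rest
termination_by l => stackSz l
decreasing_by
  · have h1 := stackSz_annotateB_le children (pre ++ (if is_last then "    " else "│   ")) (depth + 1)
    rw [stackSz_append]; simp only [stackSz, dite_eq_ite] at *; omega
  · simp only [stackSz]; omega

def generate_file_tree_diagram_alt (index_data : List (String × List (String × Int))) (max_depth : Int) : String :=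
  let files := (PySem.Dict.ofList index_data).getD "files" []
  let lines := ["graph TD", "    %% File Tree Structure"]
  let tree :=
    (PySem.List.slice
        (PySem.List.sorted (PySem.Dict.ofList files).keys (fun k => k) false)
        none (some 50)).foldl
      -- sep "/" is nonempty, so split? is always `some`
      (fun t path => trieInsertPath ((PySem.Str.split? path "/").getD []) t) TrieL.nil
  PySem.Str.join "\n" (lines ++ renderB max_depth (annotateB tree "" 0))

-- ===== PRECONDITION & SPEC =====
def Spec_generate_file_tree_diagram (index_data : List (String × List (String × Int))) (max_depth : Int) (out : String) : Prop := out = generate_file_tree_diagram_alt index_data max_depth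
instance (index_data : List (String × List (String × Int))) (max_depth : Int) (out : String) : Decidable (Spec_generate_file_tree_diagram index_data max_depth out) := by unfold Spec_generate_file_tree_diagram; infer_instance

-- ===== CLAIM (what is proved, stated in full; the proofs are below) =====
def Claim_equal_generate_file_tree_diagram : Prop := ∀ (index_data : List (String × List (String × Int))) (max_depth : Int), Dom_generate_file_tree_diagram index_data max_depth → Spec_generate_file_tree_diagram index_data max_depth (generate_file_tree_diagram index_data max_depth)

-- ===== LEMMAS AND PROOFS =====

-- the stack loop, started on an annotated items list followed by any remainder,
-- emits exactly what A's recursive render emits for that list, then continues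
theorem renderB_goAnn (maxd : Int) : ∀ (n : Nat) (l : List (String × TrieL)), pairsSz l ≤ n →
    ∀ (pre : String) (depth : Int) (rest : List (String × TrieL × String × Int × Bool)),
    renderB maxd (goAnn pre depth l ++ rest) = goA maxd pre depth l ++ renderB maxd rest := by
  intro n
  induction n with
  | zero =>
    intro l h pre depth rest
    cases l with
    | nil => simp [goAnn, goA]
    | cons hd tl => obtain ⟨_, c⟩ := hd; simp [pairsSz] at h
  | succ n ih =>
    intro l h pre depth rest
    cases l with
    | nil => simp [goAnn, goA]
    | cons hd tl =>
      obtain ⟨name, children⟩ := hd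
      simp only [pairsSz] at h
      have e2 := ih tl (by omega) pre depth rest
      by_cases hc : children ≠ TrieL.nil ∧ depth < maxd
      · have e1 := ih (PySem.List.sorted children.toPairs (fun p => p.1) false)
          (by rw [pairsSz_sorted, pairsSz_toPairs]; omega)
          (pre ++ (if tl.isEmpty then "    " else "│   ")) (depth + 1) (goAnn pre depth tl ++ rest)
        simp only [goAnn, goA, List.cons_append, renderB, annotateB, if_pos hc, e1, e2,
          List.append_assoc]
      · simp only [goAnn, goA, List.cons_append, List.nil_append, renderB, if_neg hc, e2]

theorem renderB_eq_renderA (maxd : Int) (t : TrieL) :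
    renderB maxd (annotateB t "" 0) = renderA maxd t "" 0 := by
  have h := renderB_goAnn maxd (pairsSz (PySem.List.sorted t.toPairs (fun p => p.1) false))
    (PySem.List.sorted t.toPairs (fun p => p.1) false) le_rfl "" 0 []
  simpa [annotateB, renderA, renderB] using h

-- ===== VERDICT (by name: the statement is the Claim_ definition above) =====
theorem generate_file_tree_diagram_spec : Claim_equal_generate_file_tree_diagram := by
  intro index_data max_depth _
  show _ = _
  simp only [generate_file_tree_diagram, generate_file_tree_diagram_alt]
  rw [renderB_eq_renderA]
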